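-- pv_equiv track=rewrite | github.com/wakkyb/Bioinformatics-Projects | ori finder.py | FasterSymbolArray
-- ===== SOURCE A (Python) =====
-- def FasterSymbolArray(Genome, symbol):
--     array = {}
--     # your code here
--     n = len(Genome)
--     ExtendedGenome = Genome + Genome[0:n//2]
--     array[0] = PatternCount(symbol, ExtendedGenome[0:n//2])
--     for i in range(1, n):
--         array[i] = array[i-1]
--         if ExtendedGenome[i-1] == symbol:
--             array[i] -= 1
--         if ExtendedGenome[i+(n//2)-1] == symbol:
--             array[i] += 1
--     return array
--
-- def PatternCount(Pattern, Text):
--     count = 0 # output variable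
--     for i in range(len(Text)-len(Pattern)+1):
--         if Text[i:i+len(Pattern)] == Pattern:
--             count += 1
--     return count
-- ===== SOURCE B (Python) =====
-- def PatternCount(Pattern, Text):
--     return sum(1 for i in range(len(Text) - len(Pattern) + 1)
--                if Text.startswith(Pattern, i))
--
-- def FasterSymbolArray(Genome, symbol):
--     n = len(Genome)
--     h = n // 2
--     ExtendedGenome = Genome + Genome[0:h]
--     base = PatternCount(symbol, ExtendedGenome[0:h])
--     # prefix sums: P[k] = number of positions j < k with ExtendedGenome[j] == symbol
--     P = [0]
--     s = 0
--     for ch in ExtendedGenome: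
--         if ch == symbol:
--             s += 1
--         P.append(s)
--     array = {0: base}
--     for i in range(1, n):
--         array[i] = base - P[i] + P[i + h] - P[h]
--     return array
-- ===== Notes on version B (the rewrite author's own statement) =====
-- stated objective: alternative
-- what changed: A updates each window count incrementally from the previous one inside the loop; B precomputes one prefix-sum table of symbol hits over the extended genome and fills every entry by an O(1) difference of table reads (and counts pattern occurrences via sum/startswith instead of a slice-comparing loop).
import Mathlib
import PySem

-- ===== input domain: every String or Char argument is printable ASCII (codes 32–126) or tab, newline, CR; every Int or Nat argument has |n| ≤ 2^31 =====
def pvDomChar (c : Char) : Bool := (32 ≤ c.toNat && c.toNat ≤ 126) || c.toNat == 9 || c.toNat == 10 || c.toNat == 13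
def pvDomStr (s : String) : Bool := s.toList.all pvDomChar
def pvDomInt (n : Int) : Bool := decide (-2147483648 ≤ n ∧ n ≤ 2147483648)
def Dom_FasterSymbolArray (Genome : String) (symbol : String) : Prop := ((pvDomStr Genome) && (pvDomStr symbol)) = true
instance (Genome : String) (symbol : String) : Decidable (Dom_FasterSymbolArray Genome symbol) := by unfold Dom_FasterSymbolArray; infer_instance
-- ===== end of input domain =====

-- B replaces A's running incremental window update by a precomputed prefix-sum table read off with O(1) differences per entry (alternative decomposition, same asymptotic cost).

-- ===== PORT A =====
-- PatternCount(Pattern, Text): loop over start positions, compare the slice Text[i:i+len(Pattern)] with Pattern.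
def pvPatternCountA (Pattern Text : List Char) : Int :=
  (PySem.List.pyRange 0 ((Text.length : Int) - (Pattern.length : Int) + 1) 1).foldl
    (fun count i =>
      if PySem.List.slice Text (some i) (some (i + (Pattern.length : Int))) = Pattern then count + 1 else count) 0

-- E[j] == symbol for a single-index access: Python compares the 1-character string E[j] with symbol.
-- (j is always in range in A's loop, so the `none` branch is unreachable.)
def pvEqSym (o : Option Char) (sym : List Char) : Bool :=
  match o with
  | some c => decide ([c] = sym)
  | none => false

-- one iteration of A's loop body
def pvStepA (E sym : List Char) (half : Int) (d : PySem.Dict Int Int) (i : Int) : PySem.Dict Int Int :=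
  let v := d.getD (i - 1) 0
  let v := if pvEqSym (PySem.List.pyGet? E (i - 1)) sym then v - 1 else v
  let v := if pvEqSym (PySem.List.pyGet? E (i + half - 1)) sym then v + 1 else v
  d.insert i v

def FasterSymbolArray (Genome : String) (symbol : String) : List (Int × Int) :=
  let g := Genome.toList
  let sym := symbol.toList
  let n : Int := (g.length : Int)
  let half := PySem.Int.floordiv n 2
  let E := g ++ PySem.List.slice g (some 0) (some half)
  let d0 := (PySem.Dict.empty : PySem.Dict Int Int).insert 0
      (pvPatternCountA sym (PySem.List.slice E (some 0) (some half)))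
  ((PySem.List.pyRange 1 n 1).foldl (pvStepA E sym half) d0).items

-- ===== PORT B =====
-- B's PatternCount: sum(1 for i in range(...) if Text.startswith(Pattern, i)); every i here is ≥ 0,
-- so Text.startswith(Pattern, i) is exactly Pattern.isPrefixOf (Text.drop i.toNat).
def pvPatternCountB (Pattern Text : List Char) : Int :=
  ((PySem.List.pyRange 0 ((Text.length : Int) - (Pattern.length : Int) + 1) 1).map
    (fun i => if Pattern.isPrefixOf (Text.drop i.toNat) then (1 : Int) else 0)).sum

-- one iteration of B's prefix-sum building loop; state = (P so far, running count s)
def pvPrefixStep (sym : List Char) (acc : List Int × Int) (ch : Char) : List Int × Int :=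
  let s := if decide ([ch] = sym) then acc.2 + 1 else acc.2
  (acc.1 ++ [s], s)

def FasterSymbolArray_alt (Genome : String) (symbol : String) : List (Int × Int) :=
  let g := Genome.toList
  let sym := symbol.toList
  let n : Int := (g.length : Int)
  let h := PySem.Int.floordiv n 2
  let E := g ++ PySem.List.slice g (some 0) (some h)
  let base := pvPatternCountB sym (PySem.List.slice E (some 0) (some h))
  let P := (E.foldl (pvPrefixStep sym) ([0], 0)).1
  (0, base) :: (PySem.List.pyRange 1 n 1).map (fun i =>
    (i, base - PySem.List.pyGetD P i 0 + PySem.List.pyGetD P (i + h) 0 - PySem.List.pyGetD P h 0))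

-- ===== PRECONDITION & SPEC =====
def Spec_FasterSymbolArray (Genome : String) (symbol : String) (out : List (Int × Int)) : Prop := out = FasterSymbolArray_alt Genome symbol
instance (Genome : String) (symbol : String) (out : List (Int × Int)) : Decidable (Spec_FasterSymbolArray Genome symbol out) := by unfold Spec_FasterSymbolArray; infer_instance

-- ===== CLAIM (what is proved, stated in full; the proofs are below) =====
def Claim_equal_FasterSymbolArray : Prop := ∀ (Genome : String) (symbol : String), Dom_FasterSymbolArray Genome symbol → Spec_FasterSymbolArray Genome symbol (FasterSymbolArray Genome symbol)

-- ===== LEMMAS AND PROOFS =====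

-- pvS E sym k = number of positions j < k where E[j] (as a 1-character string) equals sym
def pvS (E sym : List Char) (k : Nat) : Int :=
  ((E.take k).countP (fun c => decide ([c] = sym)) : Int)

theorem pvS_succ (E sym : List Char) (j : Nat) (hj : j < E.length) :
    pvS E sym (j + 1) = pvS E sym j + (if decide ([E[j]] = sym) then 1 else 0) := by
  unfold pvS
  rw [List.take_add_one, List.getElem?_eq_getElem hj]
  simp only [Option.toList_some, List.countP_append, List.countP_cons, List.countP_nil]
  split_ifs <;> simp


theorem pvPrefix_aux (sym L : List Char) (acc : List Int) (s : Int) :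
    (L.foldl (pvPrefixStep sym) (acc, s)).1
      = acc ++ (List.range L.length).map (fun k => s + pvS L sym (k + 1)) := by
  induction L generalizing acc s with
  | nil => simp
  | cons c L' ih =>
    simp only [List.foldl_cons, pvPrefixStep]
    rw [ih]
    simp only [List.length_cons, List.range_succ_eq_map, List.map_cons, List.map_map]
    have h0 : pvS (c :: L') sym 1 = (if decide ([c] = sym) then 1 else 0) := by
      unfold pvS
      simp only [List.take_succ_cons, List.take_zero, List.countP_cons, List.countP_nil]
      split_ifs <;> simp_all
    have hstep : ∀ k : Nat, pvS (c :: L') sym (k + 1 + 1)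
        = (if decide ([c] = sym) then (1:Int) else 0) + pvS L' sym (k + 1) := by
      intro k; unfold pvS
      simp only [List.take_succ_cons, List.countP_cons]
      split_ifs with hc
      · simp_all
        ring
      · simp_all
    simp only [List.append_assoc, List.singleton_append]
    congr 1
    rw [h0]
    congr 1
    · split_ifs <;> ring
    · apply List.map_congr_left; intro k _
      simp only [Function.comp_apply, Nat.succ_eq_add_one, hstep k]
      split_ifs <;> ring

theorem pvPrefix_spec (sym E : List Char) :
    (E.foldl (pvPrefixStep sym) ([0], 0)).1
      = (List.range (E.length + 1)).map (fun k => pvS E sym k) := by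
  rw [pvPrefix_aux]
  rw [List.range_succ_eq_map, List.map_cons, List.map_map]
  have : pvS E sym 0 = 0 := by unfold pvS; simp
  simp [this]

theorem pvPatternCount_eq (Pattern Text : List Char) :
    pvPatternCountA Pattern Text = pvPatternCountB Pattern Text := by
  unfold pvPatternCountA pvPatternCountB
  rw [PySem.List.foldl_ite_add_one, PySem.List.sum_map_ite_one_zero]
  rw [zero_add]
  congr 1
  apply List.countP_congr
  intro i hi
  have h0 : 0 ≤ i := (PySem.List.mem_pyRange_one.mp hi).1
  have hslice : PySem.List.slice Text (some i) (some (i + (Pattern.length : Int)))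
      = (Text.drop i.toNat).take Pattern.length := by
    rw [PySem.List.slice_toNat _ h0 (by omega)]
    congr 1
    omega
  rw [hslice]
  simp only [decide_eq_true_eq, List.isPrefixOf_iff_prefix]
  constructor
  · intro h; rw [← h]; exact List.take_prefix _ _
  · intro h; exact (List.prefix_iff_eq_take.mp h).symm

theorem pvA_loop (E sym : List Char) (h n : Nat) (hE : E.length = n + h)
    (base : Int) (m : Nat) (hm : 1 ≤ m) (hmn : m ≤ n) :
    ((PySem.List.pyRange 1 (m : Int) 1).foldl (pvStepA E sym (h : Int))
        ((PySem.Dict.empty : PySem.Dict Int Int).insert 0 base)).items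
      = (List.range m).map (fun (i : Nat) =>
          ((i : Int), base - pvS E sym i + pvS E sym (i + h) - pvS E sym h))
    ∧ ((PySem.List.pyRange 1 (m : Int) 1).foldl (pvStepA E sym (h : Int))
        ((PySem.Dict.empty : PySem.Dict Int Int).insert 0 base)).getD ((m : Int) - 1) 0
      = base - pvS E sym (m - 1) + pvS E sym (m - 1 + h) - pvS E sym h := by
  have hS0 : pvS E sym 0 = 0 := by unfold pvS; simp
  revert hmn
  induction m, hm using Nat.le_induction with
  | base =>
    intro hmn
    rw [PySem.List.pyRange_one_eq_nil (by norm_num)]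
    constructor
    · simp [List.range_succ, hS0]
      rfl
    · norm_num [hS0]
  | succ m hm ih =>
    intro hmn
    obtain ⟨IH1, IH2⟩ := ih (by omega)
    have hcast : ((m + 1 : Nat) : Int) = (m : Int) + 1 := by push_cast; ring
    rw [hcast, PySem.List.pyRange_one_succ_right (by exact_mod_cast hm), List.foldl_append]
    set dm := (PySem.List.pyRange 1 (m : Int) 1).foldl (pvStepA E sym (h : Int))
        ((PySem.Dict.empty : PySem.Dict Int Int).insert 0 base) with hdm
    simp only [List.foldl_cons, List.foldl_nil]
    -- indices
    have hi1 : ((m : Int) - 1) = ((m - 1 : Nat) : Int) := by omega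
    have hlt1 : m - 1 < E.length := by omega
    have hi2 : ((m : Int) + (h : Int) - 1) = ((m - 1 + h : Nat) : Int) := by omega
    have hlt2 : m - 1 + h < E.length := by omega
    have hget1 : PySem.List.pyGet? E ((m : Int) - 1) = some (E[m - 1]'hlt1) := by
      rw [hi1, PySem.List.pyGet?_natCast, List.getElem?_eq_getElem hlt1]
    have hget2 : PySem.List.pyGet? E ((m : Int) + (h : Int) - 1) = some (E[m - 1 + h]'hlt2) := by
      rw [hi2, PySem.List.pyGet?_natCast, List.getElem?_eq_getElem hlt2]
    have hv : pvStepA E sym (h : Int) dm (m : Int)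
        = dm.insert (m : Int) (base - pvS E sym m + pvS E sym (m + h) - pvS E sym h) := by
      unfold pvStepA
      rw [IH2, hget1, hget2]
      have e1 : pvS E sym m = pvS E sym (m - 1) + (if decide ([E[m-1]'hlt1] = sym) then 1 else 0) := by
        have := pvS_succ E sym (m - 1) hlt1
        rw [show m - 1 + 1 = m by omega] at this
        exact this
      have e2 : pvS E sym (m + h) = pvS E sym (m - 1 + h) + (if decide ([E[m-1+h]'hlt2] = sym) then 1 else 0) := by
        have := pvS_succ E sym (m - 1 + h) hlt2
        rw [show m - 1 + h + 1 = m + h by omega] at this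
        exact this
      simp only [pvEqSym]
      congr 1
      rw [e1, e2]
      split_ifs <;> ring
    rw [hv]
    -- freshness of key m
    have hfresh : dm.contains (m : Int) = false := by
      rw [PySem.Dict.contains_eq_decide_mem_keys]
      simp only [PySem.Dict.keys, IH1, List.map_map, decide_eq_false_iff_not]
      intro hmem
      obtain ⟨i, hi, he⟩ := List.mem_map.mp hmem
      have : (i : Int) = (m : Int) := he
      have := List.mem_range.mp hi
      omega
    constructor
    · rw [PySem.Dict.items_insert_of_not_contains _ _ hfresh, IH1, List.range_succ, List.map_append]
      rfl
    · rw [show ((m : Int) + 1 - 1) = (m : Int) by ring, PySem.Dict.getD_insert_self]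
      simp

-- ===== VERDICT (by name: the statement is the Claim_ definition above) =====
theorem FasterSymbolArray_spec : Claim_equal_FasterSymbolArray := by
  intro Genome symbol _
  unfold Spec_FasterSymbolArray
  simp only [FasterSymbolArray, FasterSymbolArray_alt]
  set g := Genome.toList with hg
  set sym := symbol.toList with hsym
  have hfd : PySem.Int.floordiv ((g.length : Int)) 2 = ((g.length / 2 : Nat) : Int) := by
    exact_mod_cast PySem.Int.floordiv_natCast g.length 2
  rw [hfd]
  set h : Nat := g.length / 2 with hh
  have hslice : PySem.List.slice g (some 0) (some (h : Int)) = g.take h := by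
    rw [PySem.List.slice_zero_start, PySem.List.slice_to_natCast]
  rw [hslice]
  set E := g ++ g.take h with hEdef
  have hhle : h ≤ g.length := Nat.div_le_self _ _
  have hE : E.length = g.length + h := by
    simp [hEdef, Nat.min_eq_left hhle]
  have hbase := pvPatternCount_eq sym (PySem.List.slice E (some 0) (some (h : Int)))
  rw [hbase]
  set base := pvPatternCountB sym (PySem.List.slice E (some 0) (some (h : Int))) with hbdef
  rw [pvPrefix_spec]
  have hP : ∀ k : Nat, k ≤ E.length →
      PySem.List.pyGetD ((List.range (E.length + 1)).map (fun k => pvS E sym k)) (k : Int) 0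
        = pvS E sym k := by
    intro k hk
    rw [PySem.List.pyGetD_natCast, PySem.List.getD_map_range _ _ _ _ (by omega)]
  have hS0 : pvS E sym 0 = 0 := by unfold pvS; simp
  by_cases hn : g.length = 0
  · rw [hn]
    norm_num [PySem.List.pyRange_one_eq_nil]
    rfl
  · obtain ⟨IH1, _⟩ := pvA_loop E sym h g.length hE base g.length (by omega) (le_refl _)
    rw [IH1]
    -- both sides as cons of maps
    rw [show g.length = (g.length - 1) + 1 by omega, List.range_succ_eq_map, List.map_cons]
    rw [PySem.List.pyRange_one]
    rw [show (((((g.length - 1) + 1 : Nat) : Int)) - 1).toNat = g.length - 1 by omega]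
    rw [List.map_map, List.map_map]
    congr 1
    · simp [hS0]
    · apply List.map_congr_left
      intro k hk
      have hkl := List.mem_range.mp hk
      have c1 : ((1 : Int) + (k : Nat)) = ((k + 1 : Nat) : Int) := by push_cast; ring
      have c2 : (((k + 1 : Nat) : Int) + (h : Int)) = ((k + 1 + h : Nat) : Int) := by push_cast; ring
      simp only [Function.comp_apply, c1, c2]
      rw [hP (k+1) (by omega), hP (k+1+h) (by omega), hP h (by omega)]
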